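-- pv_equiv track=rewrite | github.com/AlexH73/PythonProject | other/stepik/sum_four_digit.py | sum_four_digit_numbers_with_digit_sum
-- ===== SOURCE A (Python) =====
-- def sum_four_digit_numbers_with_digit_sum(target_sum):
--     """
--     Находит сумму всех четырехзначных чисел, сумма цифр которых равна заданному значению.
--
--     Args:
--         target_sum: Целое число, представляющее сумму цифр.
--
--     Returns:
--         Сумма четырехзначных чисел с заданной суммой цифр.
--     """
--     total_sum = 0  # Инициализируем общую сумму
--     for number in range(1000, 10000): # Перебираем все 4-значные числа
--         number_str = str(number) # Преобразовываем число в строку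
--         digit_sum = 0 # Инициализируем сумму цифр
--         for digit in number_str: # Перебираем цифры в числе
--             digit_sum += int(digit) # Добавляем число к сумме цифр
--         if digit_sum == target_sum:  # Проверяем, равна ли сумма цифр нужной сумме
--             total_sum += number # Если равна, то добавляем число к сумме всех чисел
--     return total_sum # Возвращаем сумму
-- ===== SOURCE B (Python) =====
-- def sum_four_digit_numbers_with_digit_sum(target_sum):
--     """Enumerate digit values directly and compose the numbers, instead of
--     converting every 4-digit number to a string."""
--     total_sum = 0
--     for d1 in range(1, 10):
--         for d2 in range(10):
--             for d3 in range(10):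
--                 for d4 in range(10):
--                     if d1 + d2 + d3 + d4 == target_sum:
--                         total_sum += 1000 * d1 + 100 * d2 + 10 * d3 + d4
--     return total_sum
-- ===== Notes on version B (the rewrite author's own statement) =====
-- stated objective: alternative
-- what changed: Replaces the single loop over all four-digit numbers with string conversion and per-character digit parsing by four nested loops over the digit values themselves, composing each number from its digits arithmetically and comparing the digits' sum to the target.
import Mathlib
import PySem

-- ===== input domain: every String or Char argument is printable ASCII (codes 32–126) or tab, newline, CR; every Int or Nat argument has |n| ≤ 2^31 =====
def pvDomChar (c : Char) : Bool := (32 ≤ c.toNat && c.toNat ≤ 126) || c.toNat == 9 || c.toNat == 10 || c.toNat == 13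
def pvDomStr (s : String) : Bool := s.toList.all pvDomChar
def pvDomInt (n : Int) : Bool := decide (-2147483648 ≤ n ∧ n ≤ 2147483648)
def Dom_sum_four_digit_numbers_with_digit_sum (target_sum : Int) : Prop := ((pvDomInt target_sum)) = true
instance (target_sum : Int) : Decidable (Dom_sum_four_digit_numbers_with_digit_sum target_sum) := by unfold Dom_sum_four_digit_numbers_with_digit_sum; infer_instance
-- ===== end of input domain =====

-- B enumerates the four digit values directly and composes each number from them,
-- instead of converting every number in range(1000,10000) to a string (objective: alternative).


-- ===== PORT A =====
-- int(digit) is ported as (ofChars? [digit]).getD 0; this is exact here because every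
-- character of str(number) for number in range(1000,10000) is a decimal digit, so ofChars? never returns none.
def sum_four_digit_numbers_with_digit_sum (target_sum : Int) : Int :=
  (PySem.List.pyRange 1000 10000 1).foldl (fun total_sum number =>
    let number_str := PySem.Int.toChars number
    let digit_sum := number_str.foldl (fun acc digit => acc + (PySem.Int.ofChars? [digit]).getD 0) 0
    if digit_sum = target_sum then total_sum + number else total_sum) 0

-- ===== PORT B =====
def sum_four_digit_numbers_with_digit_sum_alt (target_sum : Int) : Int :=
  (PySem.List.pyRange 1 10 1).foldl (fun t1 d1 =>
    (PySem.List.pyRange 0 10 1).foldl (fun t2 d2 =>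
      (PySem.List.pyRange 0 10 1).foldl (fun t3 d3 =>
        (PySem.List.pyRange 0 10 1).foldl (fun t4 d4 =>
          if d1 + d2 + d3 + d4 = target_sum then t4 + (1000 * d1 + 100 * d2 + 10 * d3 + d4) else t4)
          t3) t2) t1) 0

-- ===== PRECONDITION & SPEC =====
def Spec_sum_four_digit_numbers_with_digit_sum (target_sum : Int) (out : Int) : Prop := out = sum_four_digit_numbers_with_digit_sum_alt target_sum
instance (target_sum : Int) (out : Int) : Decidable (Spec_sum_four_digit_numbers_with_digit_sum target_sum out) := by unfold Spec_sum_four_digit_numbers_with_digit_sum; infer_instance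

-- ===== CLAIM (what is proved, stated in full; the proofs are below) =====
def Claim_equal_sum_four_digit_numbers_with_digit_sum : Prop := ∀ (target_sum : Int), Dom_sum_four_digit_numbers_with_digit_sum target_sum → Spec_sum_four_digit_numbers_with_digit_sum target_sum (sum_four_digit_numbers_with_digit_sum target_sum)

-- ===== LEMMAS AND PROOFS =====

-- A's per-number digit sum (the inner loop of port A), named for the proofs.
def pvDigitSumA (n : Int) : Int :=
  (PySem.Int.toChars n).foldl (fun acc digit => acc + (PySem.Int.ofChars? [digit]).getD 0) 0

-- loop shape: a conditional accumulation is the sum of a 0-padded map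
theorem pv_foldl_ite_add {α : Type} (l : List α) (p : α → Prop) [DecidablePred p]
    (v : α → Int) (a : Int) :
    l.foldl (fun acc x => if p x then acc + v x else acc) a
      = a + (l.map (fun x => if p x then v x else 0)).sum := by
  induction l generalizing a with
  | nil => simp
  | cons x xs ih =>
    simp only [List.foldl_cons, List.map_cons, List.sum_cons]
    by_cases h : p x
    · rw [if_pos h, if_pos h, ih]; ring
    · rw [if_neg h, if_neg h, ih]; ring

theorem pv_tdc_step (f n : Nat) (ds : List Char) (h10 : 10 ≤ n) (hf : 1 ≤ f) :
    Nat.toDigitsCore 10 f n ds = Nat.toDigitsCore 10 (f - 1) (n / 10) ((n % 10).digitChar :: ds) := by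
  obtain ⟨g, rfl⟩ : ∃ g, f = g + 1 := ⟨f - 1, by omega⟩
  simp only [Nat.toDigitsCore, Nat.add_sub_cancel]
  rw [if_neg (by omega)]

theorem pv_tdc_last (f n : Nat) (ds : List Char) (h : n < 10) (hf : 1 ≤ f) :
    Nat.toDigitsCore 10 f n ds = n.digitChar :: ds := by
  obtain ⟨g, rfl⟩ : ∃ g, f = g + 1 := ⟨f - 1, by omega⟩
  simp only [Nat.toDigitsCore]
  rw [if_pos (by omega), Nat.mod_eq_of_lt h]

theorem pv_toDigits4 (n : Nat) (h1 : 1000 ≤ n) (h2 : n < 10000) :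
    Nat.toDigits 10 n
      = [(n / 1000).digitChar, (n / 100 % 10).digitChar, (n / 10 % 10).digitChar, (n % 10).digitChar] := by
  rw [show Nat.toDigits 10 n = Nat.toDigitsCore 10 (n + 1) n [] from rfl]
  rw [pv_tdc_step _ _ _ (by omega) (by omega)]
  rw [pv_tdc_step _ _ _ (by omega) (by omega)]
  rw [pv_tdc_step _ _ _ (by omega) (by omega)]
  rw [pv_tdc_last _ _ _ (by omega) (by omega)]
  rw [show n / 10 / 10 / 10 = n / 1000 by omega, show n / 10 / 10 = n / 100 by omega]

theorem pv_parse_digit (d : Nat) (hd : d < 10) :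
    (PySem.Int.ofChars? [d.digitChar]).getD 0 = (d : Int) := by
  interval_cases d <;> decide

theorem pv_digitSumA_eq (m : Nat) (h1 : 1000 ≤ m) (h2 : m < 10000) :
    pvDigitSumA (m : Int)
      = ((m / 1000 : Nat) : Int) + ↑(m / 100 % 10) + ↑(m / 10 % 10) + ↑(m % 10) := by
  unfold pvDigitSumA
  rw [show PySem.Int.toChars (m : Int) = Nat.toDigits 10 m from by
        simp [PySem.Int.toChars, Int.not_lt.mpr (Int.natCast_nonneg m)]]
  rw [pv_toDigits4 m h1 h2]
  simp only [List.foldl_cons, List.foldl_nil]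
  rw [pv_parse_digit _ (by omega), pv_parse_digit _ (by omega),
      pv_parse_digit _ (by omega), pv_parse_digit _ (by omega)]
  ring

-- block decomposition of a sum over range (m*n)
theorem pv_sum_range_mul (m n : Nat) (f : Nat → Int) :
    ((List.range (m * n)).map f).sum
      = ((List.range m).map (fun i => ((List.range n).map (fun j => f (n * i + j))).sum)).sum := by
  induction m with
  | zero => simp
  | succ m ih =>
    rw [show (m + 1) * n = m * n + n by ring, List.range_add, List.map_append, List.sum_append, ih,
        List.range_succ, List.map_append, List.sum_append]
    simp only [List.map_cons, List.map_nil, List.sum_cons, List.sum_nil, add_zero, List.map_map]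
    congr 1
    apply congrArg List.sum
    apply List.map_congr_left
    intro j _
    simp [Function.comp, Nat.mul_comm]

theorem pv_main (t : Int) :
    sum_four_digit_numbers_with_digit_sum t = sum_four_digit_numbers_with_digit_sum_alt t := by
  have hA : sum_four_digit_numbers_with_digit_sum t
      = (PySem.List.pyRange 1000 10000 1).foldl
          (fun total n => if pvDigitSumA n = t then total + n else total) 0 := rfl
  have hr1 : PySem.List.pyRange 1000 10000 1 = (List.range 9000).map (fun k : Nat => 1000 + (k : Int)) := by
    rw [PySem.List.pyRange_of_pos _ _ (by norm_num), if_pos (by norm_num),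
        show ((10000 - 1000 + 1 - 1 : Int) / 1).toNat = 9000 by decide]
    simp only [one_mul]
  have hr9 : PySem.List.pyRange 1 10 1 = (List.range 9).map (fun k : Nat => 1 + (k : Int)) := by
    rw [PySem.List.pyRange_of_pos _ _ (by norm_num), if_pos (by norm_num),
        show ((10 - 1 + 1 - 1 : Int) / 1).toNat = 9 by decide]
    simp only [one_mul]
  have hr10 : PySem.List.pyRange 0 10 1 = (List.range 10).map (fun k : Nat => (k : Int)) := by
    rw [PySem.List.pyRange_of_pos _ _ (by norm_num), if_pos (by norm_num),
        show ((10 - 0 + 1 - 1 : Int) / 1).toNat = 10 by decide]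
    simp only [one_mul, zero_add]
  rw [hA, hr1]
  unfold sum_four_digit_numbers_with_digit_sum_alt
  rw [hr9, hr10]
  simp only [List.foldl_map]
  simp only [pv_foldl_ite_add, PySem.List.foldl_add, zero_add]
  -- decompose A's single range 9000 into digit blocks
  have h1000 : ∀ F : Nat → Int, ((List.range 1000).map F).sum
      = ((List.range 10).map (fun b => ((List.range 100).map (fun j => F (100 * b + j))).sum)).sum := by
    intro F; have h := pv_sum_range_mul 10 100 F; norm_num at h; exact h
  have h100 : ∀ F : Nat → Int, ((List.range 100).map F).sum
      = ((List.range 10).map (fun c => ((List.range 10).map (fun j => F (10 * c + j))).sum)).sum := by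
    intro F; have h := pv_sum_range_mul 10 10 F; norm_num at h; exact h
  rw [show (9000 : Nat) = 9 * 1000 from rfl, pv_sum_range_mul]
  simp only [h1000, h100]
  apply congrArg List.sum
  apply List.map_congr_left; intro a ha
  apply congrArg List.sum
  apply List.map_congr_left; intro b hb
  apply congrArg List.sum
  apply List.map_congr_left; intro c hc
  apply congrArg List.sum
  apply List.map_congr_left; intro d hd
  rw [List.mem_range] at ha hb hc hd
  rw [show (1000 + (↑(1000 * a + (100 * b + (10 * c + d))) : Int))
        = ((1000 + (1000 * a + (100 * b + (10 * c + d))) : Nat) : Int) by push_cast; ring]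
  rw [pv_digitSumA_eq _ (by omega) (by omega)]
  rw [show (1000 + (1000 * a + (100 * b + (10 * c + d)))) / 1000 = 1 + a by omega,
      show (1000 + (1000 * a + (100 * b + (10 * c + d)))) / 100 % 10 = b by omega,
      show (1000 + (1000 * a + (100 * b + (10 * c + d)))) / 10 % 10 = c by omega,
      show (1000 + (1000 * a + (100 * b + (10 * c + d)))) % 10 = d by omega]
  split_ifs with hp hq hq
  · push_cast; ring
  · exfalso; push_cast at hp hq; omega
  · exfalso; push_cast at hp hq; omega
  · rfl

-- ===== VERDICT (by name: the statement is the Claim_ definition above) =====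
theorem sum_four_digit_numbers_with_digit_sum_spec : Claim_equal_sum_four_digit_numbers_with_digit_sum := by
  intro t _
  exact pv_main t
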